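-- pv_equiv track=rewrite | github.com/IvanParvanovski/SoftUniPractice | Python/Functions(EXERCISE)/Array_Manipulator.py | first_count_odd
-- ===== SOURCE A (Python) =====
-- def first_count_odd(first_odd_elements_count, main_list):
--     first_odd_numbers_list = list()
--     main_list_copy = list()
--     for counter_copy in range(len(main_list)):
--         element = main_list[counter_copy]
--         main_list_copy.append(element)
--     for counter in range(first_odd_elements_count):
--         for index in range(len(main_list_copy)):
--             element = main_list_copy[index]
--             if int(element) % 2 != 0:
--                 first_odd_numbers_list.append(int(element))
--                 main_list_copy.remove(element)
--                 break
--     return first_odd_numbers_list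
-- ===== SOURCE B (Python) =====
-- def first_count_odd(first_odd_elements_count, main_list):
--     result = []
--     for element in main_list:
--         if len(result) >= first_odd_elements_count:
--             break
--         if element % 2 != 0:
--             result.append(element)
--     return result
-- ===== Notes on version B (the rewrite author's own statement) =====
-- stated objective: faster
-- what changed: Replaces A's copy-then-(count x rescan-and-remove) extraction with a single left-to-right pass that collects odd elements until the requested count is reached.
import Mathlib
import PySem

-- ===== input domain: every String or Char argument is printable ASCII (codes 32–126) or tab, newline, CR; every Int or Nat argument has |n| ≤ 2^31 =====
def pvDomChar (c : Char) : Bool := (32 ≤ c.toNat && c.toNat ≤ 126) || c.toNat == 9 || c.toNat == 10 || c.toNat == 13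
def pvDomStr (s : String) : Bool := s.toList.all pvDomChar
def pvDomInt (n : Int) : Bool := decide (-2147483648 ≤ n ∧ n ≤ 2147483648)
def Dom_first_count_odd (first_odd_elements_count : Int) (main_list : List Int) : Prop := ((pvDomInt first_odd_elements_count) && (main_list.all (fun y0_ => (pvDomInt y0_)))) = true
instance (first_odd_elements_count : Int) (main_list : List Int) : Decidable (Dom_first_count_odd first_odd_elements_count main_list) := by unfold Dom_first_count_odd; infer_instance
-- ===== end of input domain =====

-- B replaces A's copy-then-(count × rescan-and-remove) extraction with a single pass collecting odds until the count is reached.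


-- ===== PORT A =====
-- inner 'for index in range(len(main_list_copy)) … break': scan for the first odd element
def pvScanOddA : List Int → Option Int
  | [] => none
  | x :: xs => if PySem.Int.mod x 2 ≠ 0 then some x else pvScanOddA xs

-- one iteration of the outer 'for counter in range(first_odd_elements_count)' body
def pvStepA (st : List Int × List Int) : List Int × List Int :=
  match pvScanOddA st.2 with
  | none => st
  | some e => (st.1 ++ [e], (PySem.List.remove? st.2 e).getD st.2)

def first_count_odd (first_odd_elements_count : Int) (main_list : List Int) : List Int :=
  -- outer loop over range(first_odd_elements_count); its start state holds the first
  -- loop's element-by-element copy of main_list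
  ((PySem.List.pyRange 0 first_odd_elements_count 1).foldl
      (fun st _ => pvStepA st)
      (([] : List Int),
       (PySem.List.pyRange 0 (main_list.length : Int) 1).foldl
         (fun c i => c ++ [PySem.List.pyGetD main_list i 0]) [])).1

-- ===== PORT B =====
def pvCollectB (count : Int) (result : List Int) : List Int → List Int
  | [] => result
  | x :: xs =>
    if (result.length : Int) ≥ count then result
    else if PySem.Int.mod x 2 ≠ 0 then pvCollectB count (result ++ [x]) xs
    else pvCollectB count result xs

def first_count_odd_alt (first_odd_elements_count : Int) (main_list : List Int) : List Int :=
  pvCollectB first_odd_elements_count [] main_list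

-- ===== PRECONDITION & SPEC =====
def Spec_first_count_odd (first_odd_elements_count : Int) (main_list : List Int) (out : List Int) : Prop := out = first_count_odd_alt first_odd_elements_count main_list
instance (first_odd_elements_count : Int) (main_list : List Int) (out : List Int) : Decidable (Spec_first_count_odd first_odd_elements_count main_list out) := by unfold Spec_first_count_odd; infer_instance

-- ===== CLAIM (what is proved, stated in full; the proofs are below) =====
def Claim_equal_first_count_odd : Prop := ∀ (first_odd_elements_count : Int) (main_list : List Int), Dom_first_count_odd first_odd_elements_count main_list → Spec_first_count_odd first_odd_elements_count main_list (first_count_odd first_odd_elements_count main_list)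

-- ===== LEMMAS AND PROOFS =====
def pvOdd (x : Int) : Bool := decide (PySem.Int.mod x 2 ≠ 0)

lemma pvOdd_true {x : Int} (h : PySem.Int.mod x 2 ≠ 0) : pvOdd x = true := by
  unfold pvOdd; exact decide_eq_true h

lemma pvOdd_false {x : Int} (h : ¬ PySem.Int.mod x 2 ≠ 0) : pvOdd x = false := by
  unfold pvOdd; exact decide_eq_false h

lemma pvScanOddA_spec (copy : List Int) :
    (pvScanOddA copy = none ∧ copy.filter pvOdd = []) ∨
    (∃ e r, pvScanOddA copy = some e ∧ (PySem.List.remove? copy e).getD copy = r ∧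
      copy.filter pvOdd = e :: r.filter pvOdd) := by
  induction copy with
  | nil => left; exact ⟨rfl, rfl⟩
  | cons x xs ih =>
    by_cases hx : PySem.Int.mod x 2 ≠ 0
    · right
      refine ⟨x, xs, ?_, ?_, ?_⟩
      · show (if PySem.Int.mod x 2 ≠ 0 then some x else pvScanOddA xs) = some x
        rw [if_pos hx]
      · rw [PySem.List.remove?_cons_self]; rfl
      · rw [List.filter_cons_of_pos (pvOdd_true hx)]
    · have hscan : pvScanOddA (x :: xs) = pvScanOddA xs := by
        show (if PySem.Int.mod x 2 ≠ 0 then some x else pvScanOddA xs) = pvScanOddA xs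
        rw [if_neg hx]
      have hodd : pvOdd x = false := pvOdd_false hx
      have hfilter : (x :: xs).filter pvOdd = xs.filter pvOdd :=
        List.filter_cons_of_neg (by rw [hodd]; exact Bool.false_ne_true)
      rcases ih with ⟨h1, h2⟩ | ⟨e, r, h1, h2, h3⟩
      · left; exact ⟨hscan.trans h1, hfilter.trans h2⟩
      · right
        have hemem : e ∈ xs.filter pvOdd := by rw [h3]; exact List.mem_cons_self
        have hoe : pvOdd e = true := (List.mem_filter.mp hemem).2
        have hne : x ≠ e := by
          intro h; rw [h, hoe] at hodd; exact Bool.noConfusion hodd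
        have hrem : PySem.List.remove? xs e = some (xs.erase e) := by
          apply PySem.List.remove?_eq_some_erase
          exact (List.mem_filter.mp hemem).1
        have hr : r = xs.erase e := by rw [hrem] at h2; exact h2.symm
        refine ⟨e, x :: r, hscan.trans h1, ?_, ?_⟩
        · rw [PySem.List.remove?_cons_of_ne xs hne, hrem, hr]; rfl
        · rw [hfilter, h3,
            List.filter_cons_of_neg (by rw [hodd]; exact Bool.false_ne_true)]

lemma pvStepA_none (acc copy : List Int) (h : copy.filter pvOdd = []) :
    pvStepA (acc, copy) = (acc, copy) := by
  rcases pvScanOddA_spec copy with ⟨h1, _⟩ | ⟨e, r, h1, _, h3⟩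
  · simp [pvStepA, h1]
  · rw [h] at h3; exact absurd h3 (by simp)

lemma pvOuter_inv (iters : List Int) (acc copy : List Int) :
    (iters.foldl (fun st _ => pvStepA st) (acc, copy)).1
      = acc ++ (copy.filter pvOdd).take iters.length := by
  induction iters generalizing acc copy with
  | nil => simp
  | cons i rest ih =>
    rcases pvScanOddA_spec copy with ⟨h1, h2⟩ | ⟨e, r, h1, h2, h3⟩
    · rw [List.foldl_cons, pvStepA_none acc copy h2, ih, h2]; simp
    · have hstep : pvStepA (acc, copy) = (acc ++ [e], r) := by simp [pvStepA, h1, h2]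
      rw [List.foldl_cons, hstep, ih, h3]
      simp [List.take_succ_cons]

lemma pvCollectB_spec (l : List Int) (count : Int) (res : List Int) :
    pvCollectB count res l = res ++ (l.filter pvOdd).take (count.toNat - res.length) := by
  induction l generalizing res with
  | nil => simp [pvCollectB]
  | cons x xs ih =>
    by_cases hc : (res.length : Int) ≥ count
    · have hz : count.toNat - res.length = 0 := by omega
      rw [pvCollectB, if_pos hc, hz]
      simp
    · have harith : count.toNat - res.length = (count.toNat - (res.length + 1)) + 1 := by omega
      by_cases hx : PySem.Int.mod x 2 ≠ 0
      · rw [pvCollectB, if_neg hc, if_pos hx, ih,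
            List.filter_cons_of_pos (pvOdd_true hx), harith, List.take_succ_cons]
        simp
      · rw [pvCollectB, if_neg hc, if_neg hx, ih,
            List.filter_cons_of_neg (by rw [pvOdd_false hx]; exact Bool.false_ne_true)]

-- ===== VERDICT (by name: the statement is the Claim_ definition above) =====
theorem first_count_odd_spec : Claim_equal_first_count_odd := by
  intro count l _hdom
  unfold Spec_first_count_odd first_count_odd first_count_odd_alt
  rw [PySem.List.foldl_pyRange_zero_pyGetD' l 0 (fun c x => c ++ [x]) [],
      PySem.List.foldl_append_singleton, pvOuter_inv, pvCollectB_spec,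
      PySem.List.length_pyRange_one]
  simp
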